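-- pv_equiv track=rewrite | github.com/ZHANGXinzheng-LAB/isSPA_1.1.2 | judge_lines.py | judge_lines
-- ===== SOURCE A (Python) =====
-- def judge_lines(inline, n=0):
--     """通过_rln判断star文件中数据从哪一行开始"""
--     trys = 50 # 尝试行数
--     intarget = -1
--     if n > 0:
--         for i in range(n, trys):
--             if inline[i].split():
--                 if inline[i].split()[0][0] != "_":
--                     if intarget == 1:
--                         return i
--                         break
--                     else:
--                         continue
--                 else: #inline[i].split()[0][0] == "_":
--                     intarget = 1
--     else:
--         for i in range(trys):
--             if inline[i].split():
--                 if inline[i].split()[0][0] != "_":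
--                     if intarget == 1:
--                         return i
--                         break
--                     else:
--                         continue
--                 else: #inline[i].split()[0][0] == "_":
--                     intarget = 1
-- ===== SOURCE B (Python) =====
-- def judge_lines(inline, n=0):
--     """Two-phase scan: find the first '_'-header line, then the first data line after it."""
--     start = n if n > 0 else 0
--     u = None
--     for i in range(start, 50):
--         toks = inline[i].split()
--         if toks and toks[0][0] == "_":
--             u = i
--             break
--     if u is None:
--         return None
--     for j in range(u + 1, 50):
--         toks = inline[j].split()
--         if toks and toks[0][0] != "_":
--             return j
--     return None
-- ===== Notes on version B (the rewrite author's own statement) =====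
-- stated objective: simpler
-- what changed: A's single scan carrying an 'intarget' flag is replaced by two separate scans: find the first '_'-header line, then return the first non-blank non-'_' line after it; A's duplicated n>0/else loop bodies collapse into one computed start index.
import Mathlib
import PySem

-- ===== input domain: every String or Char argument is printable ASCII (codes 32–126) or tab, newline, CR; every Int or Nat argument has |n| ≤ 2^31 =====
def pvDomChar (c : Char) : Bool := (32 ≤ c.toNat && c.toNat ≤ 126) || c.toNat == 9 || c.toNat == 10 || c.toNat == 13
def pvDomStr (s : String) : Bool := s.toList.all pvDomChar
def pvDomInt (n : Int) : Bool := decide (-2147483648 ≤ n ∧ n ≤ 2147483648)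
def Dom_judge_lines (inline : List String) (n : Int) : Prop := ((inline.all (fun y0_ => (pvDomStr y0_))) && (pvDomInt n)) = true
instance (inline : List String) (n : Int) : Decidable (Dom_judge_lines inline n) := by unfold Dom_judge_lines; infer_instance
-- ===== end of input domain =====

-- B replaces A's single flag-carrying loop by two separate scans (find the first '_'-header
-- line, then the first data line after it): a simpler decomposition, same cost.

-- ===== PORT A =====
-- A's single loop over range(start, 50) carrying the intarget flag; inline[i] via pyGet?
-- (none = IndexError, outside Pre_).
def pvLoopA (inline : List String) (intarget : Int) : List Int → Option Int
  | [] => none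
  | i :: rest =>
    match PySem.List.pyGet? inline i with
    | none => none  -- IndexError in Python A (excluded by Pre_)
    | some s =>
      match PySem.Str.split₀ s with
      | [] => pvLoopA inline intarget rest
      | t :: _ =>
        if PySem.Str.pyGet? t 0 ≠ some '_' then
          if intarget = 1 then some i else pvLoopA inline intarget rest
        else
          pvLoopA inline 1 rest

def judge_lines (inline : List String) (n : Int) : Option Int :=
  if n > 0 then pvLoopA inline (-1) (PySem.List.pyRange n 50 1)
  else pvLoopA inline (-1) (PySem.List.pyRange 0 50 1)

-- ===== PORT B =====
-- Phase 1: first index whose line starts with a '_' token.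
def pvPhase1 (inline : List String) : List Int → Option Int
  | [] => none
  | i :: rest =>
    match PySem.List.pyGet? inline i with
    | none => none  -- IndexError in Python B (excluded by Pre_)
    | some s =>
      match PySem.Str.split₀ s with
      | [] => pvPhase1 inline rest
      | t :: _ => if PySem.Str.pyGet? t 0 = some '_' then some i else pvPhase1 inline rest

-- Phase 2: first index after the header whose line is a non-'_' data line.
def pvPhase2 (inline : List String) : List Int → Option Int
  | [] => none
  | j :: rest =>
    match PySem.List.pyGet? inline j with
    | none => none  -- IndexError in Python B (excluded by Pre_)
    | some s =>
      match PySem.Str.split₀ s with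
      | [] => pvPhase2 inline rest
      | t :: _ => if PySem.Str.pyGet? t 0 ≠ some '_' then some j else pvPhase2 inline rest

def judge_lines_alt (inline : List String) (n : Int) : Option Int :=
  let start := if n > 0 then n else 0
  match pvPhase1 inline (PySem.List.pyRange start 50 1) with
  | none => none
  | some u => pvPhase2 inline (PySem.List.pyRange (u + 1) 50 1)

-- ===== PRECONDITION & SPEC =====
-- line predicates (on the input data, not on either algorithm)
def pvIsUnder (s : String) : Bool :=
  match PySem.Str.split₀ s with
  | [] => false
  | t :: _ => PySem.Str.pyGet? t 0 = some '_'

def pvIsData (s : String) : Bool :=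
  match PySem.Str.split₀ s with
  | [] => false
  | t :: _ => PySem.Str.pyGet? t 0 ≠ some '_'

-- Pre_ = exactly the inputs on which Python A returns normally (no IndexError): the scanned
-- range is empty, or the list reaches index 49, or a data line preceded by a header line
-- occurs within the list before any out-of-range access.
def Pre_judge_lines (inline : List String) (n : Int) : Prop :=
  let start := if n > 0 then n else 0
  50 ≤ start ∨ 50 ≤ (inline.length : Int) ∨
    ∃ j ∈ PySem.List.pyRange start 50 1,
      j < (inline.length : Int) ∧ pvIsData (inline.getD j.toNat "") = true ∧
        ∃ u ∈ PySem.List.pyRange start j 1, pvIsUnder (inline.getD u.toNat "") = true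
instance (inline : List String) (n : Int) : Decidable (Pre_judge_lines inline n) := by unfold Pre_judge_lines; infer_instance

def pvWitness_judge_lines : List String × Int := (["_rlnA 1", "data 1"], 0)

def Spec_judge_lines (inline : List String) (n : Int) (out : Option Int) : Prop := out = judge_lines_alt inline n
instance (inline : List String) (n : Int) (out : Option Int) : Decidable (Spec_judge_lines inline n out) := by unfold Spec_judge_lines; infer_instance

-- ===== CLAIM (what is proved, stated in full; the proofs are below) =====
def Claim_equal_judge_lines : Prop := ∀ (inline : List String) (n : Int), Dom_judge_lines inline n → Pre_judge_lines inline n → Spec_judge_lines inline n (judge_lines inline n)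

-- ===== LEMMAS AND PROOFS =====

-- once intarget = 1, A's loop is exactly B's phase 2
theorem pvLoopA_one_eq_phase2 (inline : List String) (L : List Int) :
    pvLoopA inline 1 L = pvPhase2 inline L := by
  induction L with
  | nil => rfl
  | cons i rest ih =>
    simp only [pvLoopA, pvPhase2]
    cases PySem.List.pyGet? inline i with
    | none => rfl
    | some s =>
      dsimp only
      cases PySem.Str.split₀ s with
      | nil => exact ih
      | cons t ts =>
        dsimp only
        by_cases h : PySem.Str.pyGet? t 0 = some '_'
        · simp [h, ih]
        · simp [ih]

-- A's loop from any start equals phase 1 followed by phase 2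
theorem pvLoopA_eq_phases (inline : List String) :
    ∀ (m : Nat) (k : Int), 50 - k ≤ (m : Int) →
      pvLoopA inline (-1) (PySem.List.pyRange k 50 1) =
        (match pvPhase1 inline (PySem.List.pyRange k 50 1) with
         | none => none
         | some u => pvPhase2 inline (PySem.List.pyRange (u + 1) 50 1)) := by
  intro m
  induction m with
  | zero =>
    intro k hk
    rw [PySem.List.pyRange_one_eq_nil (by omega)]
    rfl
  | succ m ih =>
    intro k hk
    by_cases h50 : (50 : Int) ≤ k
    · rw [PySem.List.pyRange_one_eq_nil h50]; rfl
    · rw [PySem.List.pyRange_one_cons (by omega)]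
      simp only [pvLoopA, pvPhase1]
      cases PySem.List.pyGet? inline k with
      | none => rfl
      | some s =>
        dsimp only
        cases PySem.Str.split₀ s with
        | nil => exact ih (k + 1) (by omega)
        | cons t ts =>
          dsimp only
          by_cases h : PySem.Str.pyGet? t 0 = some '_'
          · simp only [h, if_pos, not_true_eq_false, ne_eq, if_false]
            exact pvLoopA_one_eq_phase2 inline _
          · simp only [h, ne_eq, not_false_eq_true, if_true, if_false,
              show ((-1 : Int) = 1) = False by simp]
            exact ih (k + 1) (by omega)

-- ===== VERDICT (by name: the statement is the Claim_ definition above) =====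
theorem judge_lines_spec : Claim_equal_judge_lines := by
  intro inline n _ _
  unfold Spec_judge_lines judge_lines judge_lines_alt
  by_cases hn : n > 0
  · simp only [if_pos hn]
    exact pvLoopA_eq_phases inline 49 n (by omega)
  · simp only [if_neg hn]
    exact pvLoopA_eq_phases inline 50 0 (by omega)
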